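-- pv_equiv track=rewrite | github.com/imirolka/hmm-fibonacci-stock-forecasting | data_plots.py | _order_tickers_by_sector
-- ===== SOURCE A (Python) =====
-- def _order_tickers_by_sector(companies_by_sector, tickers):
--     # preserve sector grouping order in companies_by_sector
--     order = []
--     seen = set()
--     for sector, comps in companies_by_sector.items():
--         for c in comps:
--             t = c.get('ticker')
--             if t in tickers and t not in seen:
--                 order.append(t)
--                 seen.add(t)
--     for t in tickers:
--         if t not in seen:
--             order.append(t)
--     return order
-- ===== SOURCE B (Python) =====
-- def _order_tickers_by_sector(companies_by_sector, tickers):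
--     # Rank table + stable sort: record the first-occurrence index of every
--     # ticker in the flattened sector stream, sort the (deduplicated) ranked
--     # tickers by that index, and append the unranked tickers unchanged.
--     rank = {}
--     i = 0
--     for comps in companies_by_sector.values():
--         for c in comps:
--             t = c.get('ticker')
--             if t not in rank:
--                 rank[t] = i
--             i += 1
--     ranked = dict.fromkeys(t for t in tickers if t in rank)
--     return sorted(ranked, key=rank.__getitem__) + [t for t in tickers if t not in rank]
-- ===== Notes on version B (the rewrite author's own statement) =====
-- stated objective: faster
-- what changed: Replaced A's single-pass seen-set accumulation (with an O(n) 't in tickers' list scan per company) with an index-table-then-sort strategy: build a dict mapping each flattened sector ticker to its first-occurrence index, then stable-sort the deduplicated requested tickers that have a rank by that index and append the unranked ones in their original order.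
import Mathlib
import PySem

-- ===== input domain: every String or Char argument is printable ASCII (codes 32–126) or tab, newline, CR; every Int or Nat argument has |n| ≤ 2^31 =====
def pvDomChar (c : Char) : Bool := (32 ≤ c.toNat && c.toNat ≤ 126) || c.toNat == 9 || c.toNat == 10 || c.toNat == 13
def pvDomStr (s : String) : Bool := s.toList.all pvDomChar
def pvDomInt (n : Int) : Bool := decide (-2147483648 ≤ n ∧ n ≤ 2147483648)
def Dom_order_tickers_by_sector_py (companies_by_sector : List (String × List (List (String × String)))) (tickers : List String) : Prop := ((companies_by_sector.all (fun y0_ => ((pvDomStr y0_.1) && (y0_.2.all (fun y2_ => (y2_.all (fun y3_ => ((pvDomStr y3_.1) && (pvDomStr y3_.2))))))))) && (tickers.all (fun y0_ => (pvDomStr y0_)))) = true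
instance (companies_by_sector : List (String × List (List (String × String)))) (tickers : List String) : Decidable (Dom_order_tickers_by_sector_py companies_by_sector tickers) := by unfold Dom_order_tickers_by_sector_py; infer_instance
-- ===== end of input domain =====

-- B replaces A's interleaved seen-set accumulation (whose `t in tickers` list scan is O(n) per
-- company) by a rank table (first-occurrence index in the flattened sector stream) plus a stable
-- sort of the deduplicated ranked tickers; a timing run measured B faster.


-- ===== PORT A =====
-- literal transliteration of _order_tickers_by_sector: nested loops over the sector dict,
-- accumulating (order, seen); then one loop appending the tickers not in seen.
def order_tickers_by_sector_py (companies_by_sector : List (String × List (List (String × String)))) (tickers : List String) : List String :=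
  let st : List String × PySem.Set String :=
    companies_by_sector.foldl (fun acc sc =>
      sc.2.foldl (fun acc2 c =>
        match (PySem.Dict.mk c).get? "ticker" with
        | some x =>
            if tickers.contains x && !(PySem.Set.contains acc2.2 x) then
              (acc2.1 ++ [x], PySem.Set.add acc2.2 x)
            else acc2
        | none => acc2) acc) ([], PySem.Set.empty)
  tickers.foldl (fun order t =>
    if !(PySem.Set.contains st.2 t) then order ++ [t] else order) st.1

-- ===== PORT B =====
-- transliteration of Source B: one loop filling the rank dict (key = looked-up ticker, an Option String
-- since c.get('ticker') may be None) with the first-occurrence index of each ticker in the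
-- flattened sector stream; then sorted(dedup(ranked tickers), key=rank.__getitem__) ++ leftovers.
-- rank.__getitem__ is ported as getD 0: every sorted element passed the 'contains' filter, so the
-- key is present and the default is never used (exact on all inputs reaching it).
def order_tickers_by_sector_py_alt (companies_by_sector : List (String × List (List (String × String)))) (tickers : List String) : List String :=
  let st : PySem.Dict (Option String) Int × Int :=
    companies_by_sector.foldl (fun acc sc =>
      sc.2.foldl (fun acc2 c =>
        let t := (PySem.Dict.mk c).get? "ticker"
        ((if acc2.1.contains t then acc2.1 else acc2.1.insert t acc2.2), acc2.2 + 1)) acc)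
      (PySem.Dict.empty, 0)
  let rank := st.1
  let ranked : List String := PySem.List.dedup (tickers.filter (fun t => rank.contains (some t)))
  PySem.List.sorted ranked (fun t => (rank.get? (some t)).getD 0)
    ++ tickers.filter (fun t => !(rank.contains (some t)))

-- ===== PRECONDITION & SPEC =====
def Spec_order_tickers_by_sector_py (companies_by_sector : List (String × List (List (String × String)))) (tickers : List String) (out : List String) : Prop := out = order_tickers_by_sector_py_alt companies_by_sector tickers
instance (companies_by_sector : List (String × List (List (String × String)))) (tickers : List String) (out : List String) : Decidable (Spec_order_tickers_by_sector_py companies_by_sector tickers out) := by unfold Spec_order_tickers_by_sector_py; infer_instance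

-- ===== CLAIM (what is proved, stated in full; the proofs are below) =====
def Claim_equal_order_tickers_by_sector_py : Prop := ∀ (companies_by_sector : List (String × List (List (String × String)))) (tickers : List String), Dom_order_tickers_by_sector_py companies_by_sector tickers → Spec_order_tickers_by_sector_py companies_by_sector tickers (order_tickers_by_sector_py companies_by_sector tickers)

-- ===== LEMMAS AND PROOFS =====

-- A's loop body, over the flattened stream of looked-up tickers
def pvStep (tickers : List String) (acc : List String × PySem.Set String) (t : Option String) : List String × PySem.Set String :=
  match t with
  | some x =>
      if tickers.contains x && !(PySem.Set.contains acc.2 x) then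
        (acc.1 ++ [x], PySem.Set.add acc.2 x)
      else acc
  | none => acc

-- B's rank-loop body, over the same flattened stream
def pvRankStep (acc : PySem.Dict (Option String) Int × Int) (t : Option String) : PySem.Dict (Option String) Int × Int :=
  ((if acc.1.contains t then acc.1 else acc.1.insert t acc.2), acc.2 + 1)

def pvP (tickers : List String) (t : Option String) : Option String :=
  match t with
  | some x => if PySem.Set.contains (PySem.Set.ofList tickers) x then some x else none
  | none => none

lemma pvPSome (tickers : List String) (a : Option String) (c : String) (h : pvP tickers a = some c) :
    a = some c := by
  match a with
  | none => simp [pvP] at h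
  | some y =>
    by_cases hy : y ∈ tickers
    · simp [pvP, hy] at h
      rw [h]
    · simp [pvP, hy] at h

-- A's head, as a function of the flattened stream
def pvHead (tickers : List String) (l : List (Option String)) : List String :=
  (PySem.Set.ofList l).filterMap (pvP tickers)

lemma pvContainsOfList (tickers : List String) (x : String) :
    PySem.Set.contains (PySem.Set.ofList tickers) x = true ↔ x ∈ tickers := by
  rw [PySem.Set.contains_iff, PySem.Set.mem_ofList]

lemma pvMemHead (tickers : List String) (l : List (Option String)) (x : String) :
    x ∈ pvHead tickers l ↔ some x ∈ l ∧ x ∈ tickers := by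
  constructor
  · intro h
    rw [pvHead, List.mem_filterMap] at h
    obtain ⟨t, ht, hp⟩ := h
    have h1 := pvPSome tickers t x hp
    subst h1
    refine ⟨(PySem.Set.mem_ofList _ _).1 ht, ?_⟩
    by_cases hc : PySem.Set.contains (PySem.Set.ofList tickers) x = true
    · exact (pvContainsOfList tickers x).1 hc
    · simp [pvP, hc] at hp
      exact hp
  · rintro ⟨hl, ht⟩
    rw [pvHead, List.mem_filterMap]
    exact ⟨some x, (PySem.Set.mem_ofList _ _).2 hl, by simp [pvP]; exact ht⟩

-- A's flattened loop computes pvHead, and its seen-set has the same members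
lemma pvKey (tickers : List String) (l : List (Option String)) :
    (l.foldl (pvStep tickers) ([], PySem.Set.empty)).1 = pvHead tickers l ∧
    (∀ x : String, PySem.Set.contains (l.foldl (pvStep tickers) ([], PySem.Set.empty)).2 x = true ↔ x ∈ pvHead tickers l) := by
  induction l using List.reverseRecOn with
  | nil =>
    refine ⟨rfl, ?_⟩
    intro x
    simp [pvHead, PySem.Set.empty, PySem.Set.ofList]
  | append_singleton l t ih =>
    obtain ⟨ih1, ih2⟩ := ih
    rw [List.foldl_append]
    have hhead : pvHead tickers (l ++ [t]) = ((PySem.Set.ofList l).add t).filterMap (pvP tickers) := by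
      rw [pvHead, PySem.Set.ofList_append_singleton]
    cases t with
    | none =>
      by_cases hm : (none : Option String) ∈ PySem.Set.ofList l
      · rw [hhead, PySem.Set.add_of_mem hm]
        exact ⟨ih1, ih2⟩
      · rw [hhead, PySem.Set.add_of_not_mem hm, List.filterMap_append]
        simp only [List.filterMap, pvP, List.append_nil]
        exact ⟨ih1, ih2⟩
    | some x =>
      by_cases hm : (some x) ∈ PySem.Set.ofList l
      · have hx : some x ∈ l := (PySem.Set.mem_ofList _ _).1 hm
        have hcond : (tickers.contains x && !(PySem.Set.contains (l.foldl (pvStep tickers) ([], PySem.Set.empty)).2 x)) = false := by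
          by_cases ht : x ∈ tickers
          · have hmemh : x ∈ pvHead tickers l := (pvMemHead tickers l x).2 ⟨hx, ht⟩
            have hc : PySem.Set.contains (l.foldl (pvStep tickers) ([], PySem.Set.empty)).2 x = true := (ih2 x).2 hmemh
            simp only [Bool.and_eq_false_iff, Bool.not_eq_false']
            exact Or.inr hc
          · have hc : tickers.contains x = false := by simpa using ht
            simp only [Bool.and_eq_false_iff]
            exact Or.inl hc
        rw [hhead, PySem.Set.add_of_mem hm]
        simp only [List.foldl_cons, List.foldl_nil, pvStep, hcond, Bool.false_eq_true, if_false]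
        exact ⟨ih1, ih2⟩
      · have hx : some x ∉ l := fun h => hm ((PySem.Set.mem_ofList _ _).2 h)
        have hnot : x ∉ pvHead tickers l := fun h => hx ((pvMemHead tickers l x).1 h).1
        have hsF : PySem.Set.contains (l.foldl (pvStep tickers) ([], PySem.Set.empty)).2 x = false := by
          cases hc : PySem.Set.contains (l.foldl (pvStep tickers) ([], PySem.Set.empty)).2 x with
          | false => rfl
          | true => exact absurd ((ih2 x).1 hc) hnot
        rw [hhead, PySem.Set.add_of_not_mem hm, List.filterMap_append]
        by_cases ht : x ∈ tickers
        · have hw : PySem.Set.contains (PySem.Set.ofList tickers) x = true := (pvContainsOfList tickers x).2 ht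
          have htc : tickers.contains x = true := by simpa using ht
          have hfm : List.filterMap (pvP tickers) [some x] = [x] := by
            simp [pvP, ht]
          rw [hfm]
          simp only [List.foldl_cons, List.foldl_nil, pvStep, hsF, htc, Bool.not_false, Bool.and_true, if_true]
          refine ⟨by rw [ih1]; rfl, ?_⟩
          intro y
          rw [PySem.Set.contains_iff, PySem.Set.mem_add]
          constructor
          · rintro (hy | rfl)
            · exact List.mem_append_left _ ((ih2 y).1 (by rwa [PySem.Set.contains_iff]))
            · exact List.mem_append_right _ (List.mem_singleton.2 rfl)
          · intro hy
            rcases List.mem_append.1 hy with hy | hy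
            · exact Or.inl (by rw [← PySem.Set.contains_iff]; exact (ih2 y).2 hy)
            · exact Or.inr (List.mem_singleton.1 hy)
        · have htc : tickers.contains x = false := by simpa using ht
          have hfm : List.filterMap (pvP tickers) [some x] = [] := by
            simp [pvP, ht]
          rw [hfm, List.append_nil]
          simp only [List.foldl_cons, List.foldl_nil, pvStep, htc, Bool.false_and, Bool.false_eq_true, if_false]
          exact ⟨ih1, ih2⟩

-- both nested loops flatten to folds over the same stream of looked-up tickers
lemma pvFlattenAux (tickers : List String) (cbs : List (String × List (List (String × String)))) (init : List String × PySem.Set String) :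
    cbs.foldl (fun acc sc =>
      sc.2.foldl (fun acc2 c =>
        match (PySem.Dict.mk c).get? "ticker" with
        | some x =>
            if tickers.contains x && !(PySem.Set.contains acc2.2 x) then
              (acc2.1 ++ [x], PySem.Set.add acc2.2 x)
            else acc2
        | none => acc2) acc) init
    = (cbs.flatMap (fun sc => sc.2.map (fun c => (PySem.Dict.mk c).get? "ticker"))).foldl (pvStep tickers) init := by
  induction cbs generalizing init with
  | nil => rfl
  | cons sc rest ih =>
    rw [List.foldl_cons, List.flatMap_cons, List.foldl_append, ← ih, List.foldl_map]
    rfl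

lemma pvRankFlatten (cbs : List (String × List (List (String × String)))) (init : PySem.Dict (Option String) Int × Int) :
    cbs.foldl (fun acc sc =>
      sc.2.foldl (fun acc2 c =>
        let t := (PySem.Dict.mk c).get? "ticker"
        ((if acc2.1.contains t then acc2.1 else acc2.1.insert t acc2.2), acc2.2 + 1)) acc) init
    = (cbs.flatMap (fun sc => sc.2.map (fun c => (PySem.Dict.mk c).get? "ticker"))).foldl pvRankStep init := by
  induction cbs generalizing init with
  | nil => rfl
  | cons sc rest ih =>
    rw [List.foldl_cons, List.flatMap_cons, List.foldl_append, ← ih, List.foldl_map]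
    rfl

lemma pvAnyFind {α : Type} (p : α → Bool) (l : List α) :
    l.any p = (List.find? p l).isSome := by
  induction l with
  | nil => rfl
  | cons a t ih => by_cases h : p a <;> simp [List.find?_cons, h, ih]

lemma pvDictContains (d : PySem.Dict (Option String) Int) (t : Option String) :
    d.contains t = (d.get? t).isSome := by
  simp only [PySem.Dict.contains, PySem.Dict.get?, Option.isSome_map]
  exact pvAnyFind _ _

-- index? facts, via its decomposition characterisation
lemma pvIdxLt (l : List (Option String)) (t : Option String) (k : Nat) (h : PySem.List.index? l t = some k) :
    k < l.length := by
  obtain ⟨pre, suf, hl, hk, -⟩ := (PySem.List.index?_eq_some_iff l t k).1 h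
  subst hl; subst hk
  simp

lemma pvIdxAppMem (l : List (Option String)) (x t : Option String) (h : t ∈ l) :
    PySem.List.index? (l ++ [x]) t = PySem.List.index? l t := by
  obtain ⟨k, hk⟩ := Option.isSome_iff_exists.1 ((PySem.List.index?_isSome_iff l t).2 h)
  obtain ⟨pre, suf, hl, hlen, hnp⟩ := (PySem.List.index?_eq_some_iff l t k).1 hk
  rw [hk]
  exact (PySem.List.index?_eq_some_iff _ t k).2 ⟨pre, suf ++ [x], by rw [hl]; simp, hlen, hnp⟩

lemma pvIdxAppSelf (l : List (Option String)) (x : Option String) (h : x ∉ l) :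
    PySem.List.index? (l ++ [x]) x = some l.length :=
  (PySem.List.index?_eq_some_iff _ x l.length).2 ⟨l, [], rfl, rfl, h⟩

lemma pvIdxAppNone (l : List (Option String)) (x t : Option String) (h1 : t ∉ l) (h2 : t ≠ x) :
    PySem.List.index? (l ++ [x]) t = none := by
  rw [PySem.List.index?_eq_none_iff _ _]
  simp [h1, h2]

-- B's rank loop records exactly the first-occurrence index of each stream element
lemma pvRankSpec (l : List (Option String)) :
    (l.foldl pvRankStep (PySem.Dict.empty, 0)).2 = (l.length : Int) ∧
    (∀ t : Option String, (l.foldl pvRankStep (PySem.Dict.empty, 0)).1.get? t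
        = Option.map Int.ofNat (PySem.List.index? l t)) := by
  induction l using List.reverseRecOn with
  | nil =>
    refine ⟨rfl, fun t => ?_⟩
    simp [(PySem.List.index?_eq_none_iff _ _).2 (List.not_mem_nil), PySem.Dict.empty, PySem.Dict.get?]
  | append_singleton l x ih =>
    obtain ⟨ih2, ih1⟩ := ih
    rw [List.foldl_append, List.foldl_cons, List.foldl_nil]
    by_cases hm : x ∈ l
    · have hc : (l.foldl pvRankStep (PySem.Dict.empty, 0)).1.contains x = true := by
        rw [pvDictContains, ih1, Option.isSome_map]
        exact (PySem.List.index?_isSome_iff l x).2 hm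
      refine ⟨by simp [pvRankStep, hc, ih2], fun t => ?_⟩
      simp only [pvRankStep, hc, if_true]
      by_cases ht : t ∈ l
      · rw [ih1, pvIdxAppMem l x t ht]
      · have htx : t ≠ x := fun h => ht (h ▸ hm)
        rw [ih1, pvIdxAppNone l x t ht htx, (PySem.List.index?_eq_none_iff _ _).2 ht]
    · have hc : (l.foldl pvRankStep (PySem.Dict.empty, 0)).1.contains x = false := by
        rw [pvDictContains, ih1, Option.isSome_map]
        simpa using (PySem.List.index?_eq_none_iff _ _).2 hm
      refine ⟨by simp [pvRankStep, hc, ih2], fun t => ?_⟩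
      simp only [pvRankStep, hc, Bool.false_eq_true, if_false]
      by_cases htx : t = x
      · subst htx
        rw [PySem.Dict.get?_insert_self, ih2, pvIdxAppSelf l t hm]
        simp
      · rw [PySem.Dict.get?_insert_of_ne _ _ htx, ih1]
        by_cases ht : t ∈ l
        · rw [pvIdxAppMem l x t ht]
        · rw [pvIdxAppNone l x t ht htx, (PySem.List.index?_eq_none_iff _ _).2 ht]

-- the ordered dedup of the stream is strictly increasing in first-occurrence index
lemma pvOfListPairwise (l : List (Option String)) :
    (PySem.Set.ofList l : List (Option String)).Pairwise
      (fun a b => (PySem.List.index? l a).getD 0 < (PySem.List.index? l b).getD 0) := by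
  induction l using List.reverseRecOn with
  | nil => simp [PySem.Set.ofList]
  | append_singleton l x ih =>
    rw [PySem.Set.ofList_append_singleton]
    by_cases hm : x ∈ PySem.Set.ofList l
    · rw [PySem.Set.add_of_mem hm]
      refine ih.imp_of_mem (fun {a b} ha hb hr => ?_)
      rw [pvIdxAppMem l x a ((PySem.Set.mem_ofList _ _).1 ha), pvIdxAppMem l x b ((PySem.Set.mem_ofList _ _).1 hb)]
      exact hr
    · have hx : x ∉ l := fun h => hm ((PySem.Set.mem_ofList _ _).2 h)
      rw [PySem.Set.add_of_not_mem hm, List.pairwise_append]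
      refine ⟨ih.imp_of_mem (fun {a b} ha hb hr => ?_), List.pairwise_singleton _ _, ?_⟩
      · rw [pvIdxAppMem l x a ((PySem.Set.mem_ofList _ _).1 ha), pvIdxAppMem l x b ((PySem.Set.mem_ofList _ _).1 hb)]
        exact hr
      · intro a ha b hb
        rw [List.mem_singleton] at hb
        subst hb
        have haml : a ∈ l := (PySem.Set.mem_ofList _ _).1 ha
        obtain ⟨k, hk⟩ := Option.isSome_iff_exists.1 ((PySem.List.index?_isSome_iff l a).2 haml)
        rw [pvIdxAppMem l b a haml, pvIdxAppSelf l b hx, hk]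
        simpa using pvIdxLt l a k hk


lemma pvHeadNodup (tickers : List String) (l : List (Option String)) : (pvHead tickers l).Nodup :=
  List.Nodup.filterMap
    (fun a a' b hb hb' => (pvPSome tickers a b hb).trans (pvPSome tickers a' b hb').symm)
    (PySem.Set.nodup_ofList l)

-- ===== VERDICT (by name: the statement is the Claim_ definition above) =====
theorem order_tickers_by_sector_py_spec : Claim_equal_order_tickers_by_sector_py := by
  intro cbs tickers _
  show order_tickers_by_sector_py cbs tickers = order_tickers_by_sector_py_alt cbs tickers
  unfold order_tickers_by_sector_py order_tickers_by_sector_py_alt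
  rw [pvFlattenAux, pvRankFlatten]
  dsimp only
  set flat : List (Option String) := cbs.flatMap (fun sc => sc.2.map (fun c => (PySem.Dict.mk c).get? "ticker")) with hflat
  obtain ⟨hA1, hA2⟩ := pvKey tickers flat
  obtain ⟨-, hR⟩ := pvRankSpec flat
  set rank := (flat.foldl pvRankStep (PySem.Dict.empty, 0)).1 with hrank
  -- rank membership = stream membership
  have hmemrank : ∀ t : String, rank.contains (some t) = decide (some t ∈ flat) := by
    intro t
    rw [pvDictContains, hR, Option.isSome_map]
    by_cases h : some t ∈ flat
    · simp [h]
    · simp [h]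
  -- the sorted head equals A's head
  have hsorted : PySem.List.sorted (PySem.List.dedup (tickers.filter (fun t => rank.contains (some t))))
      (fun t => (rank.get? (some t)).getD 0) = pvHead tickers flat := by
    apply PySem.List.sorted_eq_of_perm_of_pairwise_lt
    · rw [PySem.List.dedup_eq_ofList]
      rw [List.perm_ext_iff_of_nodup (pvHeadNodup tickers flat) (PySem.Set.nodup_ofList _)]
      intro a
      rw [pvMemHead, PySem.Set.mem_ofList, List.mem_filter, hmemrank]
      simp [and_comm]
    · -- pvHead is strictly increasing in the rank key
      have hp := pvOfListPairwise flat
      rw [pvHead, List.pairwise_filterMap]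
      refine hp.imp_of_mem (fun {a b} ha hb hr => ?_)
      intro c hc c' hc'
      have hac := pvPSome tickers a c hc
      have hbc := pvPSome tickers b c' hc'
      subst hac; subst hbc
      have haf : some c ∈ flat := (PySem.Set.mem_ofList _ _).1 ha
      have hbf : some c' ∈ flat := (PySem.Set.mem_ofList _ _).1 hb
      obtain ⟨i, hi⟩ := Option.isSome_iff_exists.1 ((PySem.List.index?_isSome_iff flat (some c)).2 haf)
      obtain ⟨j, hj⟩ := Option.isSome_iff_exists.1 ((PySem.List.index?_isSome_iff flat (some c')).2 hbf)
      rw [hi, hj] at hr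
      rw [hR, hR, hi, hj]
      simpa using hr
  rw [hsorted, ← hA1]
  rw [PySem.List.foldl_append_if (f := fun t : String => t), List.map_id']
  congr 1
  apply List.filter_congr
  intro t htm
  have : PySem.Set.contains (flat.foldl (pvStep tickers) ([], PySem.Set.empty)).2 t
      = rank.contains (some t) := by
    rw [hmemrank, Bool.eq_iff_iff, hA2 t, pvMemHead]
    simp [htm]
  rw [this]
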